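-- pv_equiv track=rewrite | github.com/iknoom/Problem_Solving | Programmers/2021 kakao blind recruitment/E.py | sweeping
-- ===== SOURCE A (Python) =====
-- def sweeping(play_time, L, logs):
--     periods = []
--     for s, e in logs:
--         if e - s < L:
--             periods.append((s - L, 1))  # up
--             periods.append((e - L, -1))  # maintain
--             periods.append((s, -1))  # down
--             periods.append((e, 1))  # maintain
--         else:
--             periods.append((s - L, 1))  # up
--             periods.append((s, -1))  # maintain
--             periods.append((e - L, -1))  # down
--             periods.append((e, 1))  # maintain
--
--     periods.append((0, 0))
--     periods.append((play_time - L, 0))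
--
--     # do sweeping
--     max_time = -1
--     ret = -1
--     y = t = 0
--     before_time = -10**18
--     for start_time, dt in sorted(periods):
--         y += t * (start_time - before_time)
--         if 0 <= start_time and start_time + L <= play_time and max_time < y:
--             max_time = y
--             ret = start_time
--         t += dt
--         before_time = start_time
--     return ret
-- ===== SOURCE B (Python) =====
-- def sweeping(play_time, L, logs):
--     if play_time - L < 0:
--         return -1
--     cands = {0, play_time - L}
--     for s, e in logs:
--         for x in (s - L, e - L, s, e):
--             if 0 <= x <= play_time - L:
--                 cands.add(x)
--     best_val = -1
--     best_start = -1
--     for x in sorted(cands):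
--         v = sum(min(L, max(0, x + L - s)) - min(L, max(0, x + L - e)) for s, e in logs)
--         if v > best_val:
--             best_val = v
--             best_start = x
--     return best_start
-- ===== Notes on version B (the rewrite author's own statement) =====
-- stated objective: alternative
-- what changed: Replaces A's slope/difference event sweep (sort 4 signed slope events per log, accumulate y incrementally along the sorted event list) by direct evaluation: collect the in-range candidate start times into a set, and at each sorted candidate x compute the total window coverage from scratch as sum of min(L,max(0,x+L-s))-min(L,max(0,x+L-e)), keeping the earliest strict maximum.
-- outside the precondition, e.g. on sweeping(11, -1, [(10, 3)]): A returns 4, B returns 0; on sweeping(8, -2, [(7, 9), (11, 7), (12, -2)]): A returns 10, B returns 0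
import Mathlib
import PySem

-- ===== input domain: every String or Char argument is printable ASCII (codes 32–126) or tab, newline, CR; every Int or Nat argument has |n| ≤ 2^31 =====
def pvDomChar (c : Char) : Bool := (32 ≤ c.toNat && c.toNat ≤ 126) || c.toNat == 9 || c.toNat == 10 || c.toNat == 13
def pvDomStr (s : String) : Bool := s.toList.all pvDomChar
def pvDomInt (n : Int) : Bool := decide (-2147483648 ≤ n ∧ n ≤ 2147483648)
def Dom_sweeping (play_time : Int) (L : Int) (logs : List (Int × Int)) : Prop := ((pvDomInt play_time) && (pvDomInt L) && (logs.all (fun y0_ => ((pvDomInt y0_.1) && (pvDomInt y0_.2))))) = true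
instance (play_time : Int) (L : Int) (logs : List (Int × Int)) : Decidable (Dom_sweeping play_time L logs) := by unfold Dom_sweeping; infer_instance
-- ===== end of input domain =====

-- B replaces A's sorted slope-event sweep by direct overlap evaluation at the candidate
-- start times (alternative algorithm, same exact result on the stated domain).

-- ===== PORT A =====
-- A-side helper: the body of A's sweep loop (state: max_time, ret, y, t, before_time)
def sweepStep (play_time L : Int) (st : Int × Int × Int × Int × Int) (p : Int × Int) :
    Int × Int × Int × Int × Int :=
  let y := st.2.2.1 + st.2.2.2.1 * (p.1 - st.2.2.2.2)
  if 0 ≤ p.1 ∧ p.1 + L ≤ play_time ∧ st.1 < y then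
    (y, p.1, y, st.2.2.2.1 + p.2, p.1)
  else
    (st.1, st.2.1, y, st.2.2.2.1 + p.2, p.1)

def sweeping (play_time : Int) (L : Int) (logs : List (Int × Int)) : Int :=
  let periods := logs.foldl (fun acc p =>
    if p.2 - p.1 < L then
      acc ++ [(p.1 - L, (1 : Int)), (p.2 - L, -1), (p.1, -1), (p.2, 1)]
    else
      acc ++ [(p.1 - L, (1 : Int)), (p.1, -1), (p.2 - L, -1), (p.2, 1)]) []
  let periods := periods ++ [((0 : Int), (0 : Int))] ++ [(play_time - L, (0 : Int))]
  let st := (PySem.List.sorted2 periods Prod.fst Prod.snd false).foldl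
    (sweepStep play_time L) (-1, -1, 0, 0, -(10 ^ 18))
  st.2.1

-- ===== PORT B =====
def sweeping_alt (play_time : Int) (L : Int) (logs : List (Int × Int)) : Int :=
  if play_time - L < 0 then -1
  else
    let cands := logs.foldl (fun c p =>
      [p.1 - L, p.2 - L, p.1, p.2].foldl (fun c x =>
        if 0 ≤ x ∧ x ≤ play_time - L then PySem.Set.add c x else c) c)
      (PySem.Set.ofList [0, play_time - L])
    let st := (PySem.List.sorted cands (fun x => x) false).foldl
      (fun (st : Int × Int) x =>
        let v := (logs.map (fun p =>
          min L (max 0 (x + L - p.1)) - min L (max 0 (x + L - p.2)))).sum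
        if st.1 < v then (v, x) else st) (-1, -1)
    st.2

-- ===== PRECONDITION & SPEC =====
-- Pre_ restricts to the task's natural domain: a nonnegative advertisement length L.
-- A still returns on negative L, but there its slope events describe windows of negative
-- length; B's per-candidate coverage formula naturally measures them as empty.
def Pre_sweeping (play_time : Int) (L : Int) (logs : List (Int × Int)) : Prop :=
  0 ≤ L
instance (play_time : Int) (L : Int) (logs : List (Int × Int)) : Decidable (Pre_sweeping play_time L logs) := by unfold Pre_sweeping; infer_instance

def pvWitness_sweeping : Int × Int × (List (Int × Int)) := (7, 2, [(1, 4), (3, 6)])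

def Spec_sweeping (play_time : Int) (L : Int) (logs : List (Int × Int)) (out : Int) : Prop := out = sweeping_alt play_time L logs
instance (play_time : Int) (L : Int) (logs : List (Int × Int)) (out : Int) : Decidable (Spec_sweeping play_time L logs out) := by unfold Spec_sweeping; infer_instance

-- ===== CLAIM (what is proved, stated in full; the proofs are below) =====
def Claim_equal_sweeping : Prop := ∀ (play_time : Int) (L : Int) (logs : List (Int × Int)), Dom_sweeping play_time L logs → Pre_sweeping play_time L logs → Spec_sweeping play_time L logs (sweeping play_time L logs)

-- ===== LEMMAS AND PROOFS =====

-- total coverage of the window [x, x+L] by the logs (B's per-candidate value)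
def ovSum (L : Int) (logs : List (Int × Int)) (x : Int) : Int :=
  (logs.map (fun p => min L (max 0 (x + L - p.1)) - min L (max 0 (x + L - p.2)))).sum

-- the piecewise-linear function defined by A's slope events
def gsum (ps : List (Int × Int)) (x : Int) : Int :=
  (ps.map (fun p => p.2 * max 0 (x - p.1))).sum

-- the (max, argmax-so-far) scan steps
def stepR (play_time L : Int) (f : Int → Int) (st : Int × Int) (x : Int) : Int × Int :=
  if 0 ≤ x ∧ x + L ≤ play_time ∧ st.1 < f x then (f x, x) else st

def stepN (f : Int → Int) (st : Int × Int) (x : Int) : Int × Int :=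
  if st.1 < f x then (f x, x) else st

def dedupAdj : List Int → List Int
  | [] => []
  | [x] => [x]
  | x :: y :: r => if x = y then dedupAdj (y :: r) else x :: dedupAdj (y :: r)

-- A's 4 events per log, as a flatMap body
def evs (L : Int) (p : Int × Int) : List (Int × Int) :=
  if p.2 - p.1 < L then [(p.1 - L, (1 : Int)), (p.2 - L, -1), (p.1, -1), (p.2, 1)]
  else [(p.1 - L, (1 : Int)), (p.1, -1), (p.2 - L, -1), (p.2, 1)]

-- gsum facts
lemma gsum_append (ps qs : List (Int × Int)) (x : Int) :
    gsum (ps ++ qs) x = gsum ps x + gsum qs x := by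
  simp [gsum]

lemma gsum_of_le (ps : List (Int × Int)) (x : Int) (h : ∀ p ∈ ps, p.1 ≤ x) :
    gsum ps x = (ps.map (fun p => p.2 * (x - p.1))).sum := by
  induction ps with
  | nil => rfl
  | cons p t ih =>
    have h1 : p.1 ≤ x := h p (by simp)
    simp only [gsum, List.map_cons, List.sum_cons] at *
    rw [ih (fun q hq => h q (by simp [hq]))]
    rw [show max 0 (x - p.1) = x - p.1 by omega]

lemma gsum_of_ge (ps : List (Int × Int)) (x : Int) (h : ∀ p ∈ ps, x ≤ p.1) :
    gsum ps x = 0 := by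
  induction ps with
  | nil => rfl
  | cons p t ih =>
    have h1 : x ≤ p.1 := h p (by simp)
    simp only [gsum, List.map_cons, List.sum_cons] at *
    rw [ih (fun q hq => h q (by simp [hq]))]
    rw [show max 0 (x - p.1) = 0 by omega]
    simp

lemma gsum_perm (ps qs : List (Int × Int)) (x : Int) (h : ps.Perm qs) :
    gsum ps x = gsum qs x :=
  List.Perm.sum_eq (List.Perm.map _ h)

lemma sum_shift (done : List (Int × Int)) (b x : Int) :
    (done.map (fun q => q.2 * (b - q.1))).sum + (done.map Prod.snd).sum * (x - b)
      = (done.map (fun q => q.2 * (x - q.1))).sum := by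
  induction done with
  | nil => simp
  | cons d dt ih =>
    simp only [List.map_cons, List.sum_cons]
    linear_combination ih

-- A's quintuple loop is the (max, ret) scan with values gsum full
lemma loopA_eq (play_time L : Int) (full : List (Int × Int)) :
    ∀ (l done : List (Int × Int)) (m r t b : Int),
    full = done ++ l →
    l.Pairwise (fun a c => a.1 ≤ c.1) →
    (∀ p ∈ done, p.1 ≤ b) → (∀ p ∈ l, b ≤ p.1) →
    t = (done.map Prod.snd).sum →
    (fun st : Int × Int × Int × Int × Int => (st.1, st.2.1))
        (l.foldl (sweepStep play_time L)
          (m, r, (done.map (fun p => p.2 * (b - p.1))).sum, t, b))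
      = (l.map Prod.fst).foldl (stepR play_time L (gsum full)) (m, r) := by
  intro l
  induction l with
  | nil => intro done m r t b _ _ _ _ _; rfl
  | cons p tl ih =>
    intro done m r t b hfull hpw hdone hl ht
    have hbp : b ≤ p.1 := hl p (by simp)
    rcases List.pairwise_cons.1 hpw with ⟨hphead, hptl⟩
    -- the y value computed at p equals gsum full p.1
    have hy : (done.map (fun q => q.2 * (b - q.1))).sum + t * (p.1 - b)
        = gsum full p.1 := by
      rw [hfull, gsum_append]
      rw [gsum_of_le done p.1 (fun q hq => le_trans (hdone q hq) hbp)]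
      rw [gsum_of_ge (p :: tl) p.1 (by
        intro q hq
        rcases List.mem_cons.1 hq with rfl | hq
        · exact le_refl _
        · exact hphead q hq)]
      rw [ht, sum_shift]
      simp
    -- apply the induction hypothesis with done' = done ++ [p]
    have hdone' : ∀ q ∈ done ++ [p], q.1 ≤ p.1 := by
      intro q hq
      rcases List.mem_append.1 hq with hq | hq
      · exact le_trans (hdone q hq) hbp
      · simp at hq; subst hq; exact le_refl _
    have hl' : ∀ q ∈ tl, p.1 ≤ q.1 := hphead
    have hfull' : full = (done ++ [p]) ++ tl := by simpa using hfull
    have ht' : t + p.2 = ((done ++ [p]).map Prod.snd).sum := by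
      simp [ht]
    have hysum : gsum full p.1 = ((done ++ [p]).map (fun q => q.2 * (p.1 - q.1))).sum := by
      rw [← hy, ht, sum_shift]
      simp
    simp only [List.foldl_cons, List.map_cons]
    by_cases hc : 0 ≤ p.1 ∧ p.1 + L ≤ play_time ∧ m < gsum full p.1
    · have hsw : sweepStep play_time L (m, r, (done.map (fun q => q.2 * (b - q.1))).sum, t, b) p
          = (gsum full p.1, p.1, ((done ++ [p]).map (fun q => q.2 * (p.1 - q.1))).sum, t + p.2, p.1) := by
        simp only [sweepStep]
        rw [if_pos (by rw [hy] at *; exact hc)]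
        rw [hy, ← hysum]
      have hst : stepR play_time L (gsum full) (m, r) p.1 = (gsum full p.1, p.1) := by
        simp only [stepR]; rw [if_pos hc]
      rw [hsw, hst]
      exact ih (done ++ [p]) _ _ (t + p.2) p.1 hfull' hptl hdone' hl' ht'
    · have hsw : sweepStep play_time L (m, r, (done.map (fun q => q.2 * (b - q.1))).sum, t, b) p
          = (m, r, ((done ++ [p]).map (fun q => q.2 * (p.1 - q.1))).sum, t + p.2, p.1) := by
        simp only [sweepStep]
        rw [if_neg (by rw [hy] at *; exact hc)]
        rw [hy, ← hysum]
      have hst : stepR play_time L (gsum full) (m, r) p.1 = (m, r) := by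
        simp only [stepR]; rw [if_neg hc]
      rw [hsw, hst]
      exact ih (done ++ [p]) _ _ (t + p.2) p.1 hfull' hptl hdone' hl' ht'

-- replacing the value function pointwise
lemma foldl_stepR_congr (play_time L : Int) (f g : Int → Int) :
    ∀ (xs : List Int) (st : Int × Int), (∀ x ∈ xs, f x = g x) →
    xs.foldl (stepR play_time L f) st = xs.foldl (stepR play_time L g) st := by
  intro xs
  induction xs with
  | nil => intro st _; rfl
  | cons x t ih =>
    intro st h
    have hx : f x = g x := h x (by simp)
    simp only [List.foldl_cons]
    rw [show stepR play_time L f st x = stepR play_time L g st x by simp [stepR, hx]]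
    exact ih _ (fun z hz => h z (by simp [hz]))

-- the range test of stepR is a filter
lemma foldl_stepR_filter (play_time L : Int) (f : Int → Int) :
    ∀ (xs : List Int) (st : Int × Int),
    xs.foldl (stepR play_time L f) st
      = (xs.filter (fun x => decide (0 ≤ x ∧ x ≤ play_time - L))).foldl (stepN f) st := by
  intro xs
  induction xs with
  | nil => intro st; rfl
  | cons x t ih =>
    intro st
    by_cases hr : 0 ≤ x ∧ x ≤ play_time - L
    · have hs : stepR play_time L f st x = stepN f st x := by
        simp only [stepR, stepN]
        have : (0 ≤ x ∧ x + L ≤ play_time ∧ st.1 < f x) ↔ st.1 < f x := by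
          constructor
          · rintro ⟨_, _, h⟩; exact h
          · intro h; exact ⟨hr.1, by omega, h⟩
        rw [if_congr this rfl rfl]
      simp only [List.foldl_cons, List.filter_cons, hr, hs]
      exact ih _
    · have hs : stepR play_time L f st x = st := by
        simp only [stepR]
        rw [if_neg]; omega
      simp only [List.foldl_cons, List.filter_cons, hs]
      rw [if_neg (by simpa using hr)]
      exact ih _

lemma stepN_idem (f : Int → Int) (st : Int × Int) (x : Int) :
    stepN f (stepN f st x) x = stepN f st x := by
  simp only [stepN]
  split_ifs with h1 h2 <;> simp_all

-- adjacent duplicates do not change the scan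
lemma foldl_stepN_dedupAdj (f : Int → Int) :
    ∀ (xs : List Int) (st : Int × Int),
    (dedupAdj xs).foldl (stepN f) st = xs.foldl (stepN f) st := by
  intro xs
  induction xs using dedupAdj.induct with
  | case1 => intro st; rfl
  | case2 x => intro st; rfl
  | case3 x r ih =>
    intro st
    simp only [dedupAdj, if_true]
    rw [ih, List.foldl_cons, List.foldl_cons, List.foldl_cons, stepN_idem]
  | case4 x y r hne ih =>
    intro st
    simp only [dedupAdj, if_neg hne, List.foldl_cons]
    exact ih _

lemma mem_dedupAdj (xs : List Int) (x : Int) : x ∈ dedupAdj xs ↔ x ∈ xs := by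
  induction xs using dedupAdj.induct with
  | case1 => simp [dedupAdj]
  | case2 y => simp [dedupAdj]
  | case3 y r ih => simp only [dedupAdj, if_true] at *; simp [ih]
  | case4 a y r hne ih => simp [dedupAdj, if_neg hne, ih]

lemma pairwise_lt_dedupAdj (xs : List Int) (h : xs.Pairwise (· ≤ ·)) :
    (dedupAdj xs).Pairwise (· < ·) := by
  induction xs using dedupAdj.induct with
  | case1 => simp [dedupAdj]
  | case2 y => simp [dedupAdj]
  | case3 y r ih =>
    simp only [dedupAdj, if_true]
    exact ih (List.Pairwise.sublist (by simp) h)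
  | case4 a y r hne ih =>
    simp only [dedupAdj, if_neg hne]
    rcases List.pairwise_cons.1 h with ⟨ha, ht⟩
    refine List.pairwise_cons.2 ⟨?_, ih ht⟩
    intro z hz
    rw [mem_dedupAdj] at hz
    rcases List.pairwise_cons.1 ht with ⟨hy, _⟩
    have hay : a ≤ y := ha y (by simp)
    rcases List.mem_cons.1 hz with rfl | hz
    · omega
    · have := hy z hz; omega

-- stepR never fires when play_time < L
lemma foldl_stepR_neg (play_time L : Int) (f : Int → Int)
    (hneg : play_time - L < 0) :
    ∀ (xs : List Int) (st : Int × Int), xs.foldl (stepR play_time L f) st = st := by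
  intro xs
  induction xs with
  | nil => intro st; rfl
  | cons x t ih =>
    intro st
    simp only [List.foldl_cons]
    rw [show stepR play_time L f st x = st by simp only [stepR]; rw [if_neg]; omega]
    exact ih st

-- sorted2 by (fst, snd) is Pairwise (fst ≤ fst)
lemma insertBy_pairwise_fst (before : Int × Int → Int × Int → Bool)
    (htrue : ∀ a b, before a b = true → a.1 ≤ b.1)
    (hfalse : ∀ a b, before a b = false → b.1 ≤ a.1)
    (x : Int × Int) :
    ∀ (ys : List (Int × Int)), ys.Pairwise (fun a c => a.1 ≤ c.1) →
    (PySem.List.insertBy before x ys).Pairwise (fun a c => a.1 ≤ c.1) := by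
  intro ys
  induction ys with
  | nil => intro _; simp [PySem.List.insertBy]
  | cons y t ih =>
    intro h
    rcases List.pairwise_cons.1 h with ⟨hy, ht⟩
    rw [PySem.List.insertBy]
    by_cases hb : before x y = true
    · rw [if_pos hb]
      refine List.pairwise_cons.2 ⟨?_, h⟩
      intro z hz
      have hxy := htrue _ _ hb
      rcases List.mem_cons.1 hz with rfl | hz
      · exact hxy
      · exact le_trans hxy (hy z hz)
    · rw [if_neg hb]
      refine List.pairwise_cons.2 ⟨?_, ih ht⟩
      intro z hz
      rcases (PySem.List.mem_insertBy before x z t).1 hz with rfl | hz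
      · exact hfalse _ _ (by simpa using hb)
      · exact hy z hz

lemma sorted2_fst_pairwise (ps : List (Int × Int)) :
    (PySem.List.sorted2 ps Prod.fst Prod.snd false).Pairwise (fun a c => a.1 ≤ c.1) := by
  have key : ∀ (l : List (Int × Int)) (acc : List (Int × Int)),
      acc.Pairwise (fun a c => a.1 ≤ c.1) →
      (l.foldl (fun acc x => PySem.List.insertBy
        (fun a b => decide (a.1 < b.1) || (!decide (b.1 < a.1) && decide (a.2 < b.2))) x acc) acc).Pairwise
        (fun a c => a.1 ≤ c.1) := by
    intro l
    induction l with
    | nil => intro acc h; exact h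
    | cons p t ih =>
      intro acc h
      simp only [List.foldl_cons]
      refine ih _ (insertBy_pairwise_fst _ ?_ ?_ _ _ h)
      · intro a b hb
        simp only [Bool.or_eq_true, Bool.and_eq_true, decide_eq_true_eq, Bool.not_eq_true',
          decide_eq_false_iff_not] at hb
        rcases hb with hb | ⟨hb, _⟩ <;> omega
      · intro a b hb
        simp only [Bool.or_eq_false_iff, Bool.and_eq_false_iff, decide_eq_false_iff_not,
          Bool.not_eq_false', decide_eq_true_eq] at hb
        rcases hb with ⟨hb1, hb2⟩
        omega
  show (List.foldl _ [] ps).Pairwise _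
  exact key ps [] (by simp)

-- under Pre_, A's event function equals B's direct overlap
lemma gsum_flatMap_evs (L : Int) (hL : 0 ≤ L) :
    ∀ (logs : List (Int × Int)) (x : Int),
    gsum (logs.flatMap (evs L)) x = ovSum L logs x := by
  intro logs
  induction logs with
  | nil => intro x; rfl
  | cons p t ih =>
    intro x
    rw [List.flatMap_cons, gsum_append, ih x]
    have : gsum (evs L p) x
        = min L (max 0 (x + L - p.1)) - min L (max 0 (x + L - p.2)) := by
      unfold evs
      split_ifs <;> simp [gsum] <;> omega
    simp only [ovSum, List.map_cons, List.sum_cons]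
    rw [this, ← ovSum]

-- candidate-set characterization for B
lemma condfold_spec (play_time L : Int) :
    ∀ (zs : List Int) (c : PySem.Set Int), c.Nodup →
    (zs.foldl (fun c x => if 0 ≤ x ∧ x ≤ play_time - L then PySem.Set.add c x else c) c).Nodup ∧
    (∀ x, x ∈ zs.foldl (fun c x => if 0 ≤ x ∧ x ≤ play_time - L then PySem.Set.add c x else c) c
      ↔ x ∈ c ∨ (x ∈ zs ∧ 0 ≤ x ∧ x ≤ play_time - L)) := by
  intro zs
  induction zs with
  | nil => intro c hc; exact ⟨hc, by simp⟩
  | cons z t ih =>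
    intro c hc
    by_cases hz : 0 ≤ z ∧ z ≤ play_time - L
    · have h1 := ih (PySem.Set.add c z) (PySem.Set.nodup_add c z hc)
      refine ⟨by simpa [hz] using h1.1, ?_⟩
      intro x
      simp only [List.foldl_cons, if_pos hz]
      rw [h1.2 x, PySem.Set.mem_add]
      constructor
      · rintro ((hx | rfl) | hx)
        · exact Or.inl hx
        · exact Or.inr ⟨by simp, hz⟩
        · exact Or.inr ⟨by simp [hx.1], hx.2⟩
      · rintro (hx | ⟨hx, hr⟩)
        · exact Or.inl (Or.inl hx)
        · rcases List.mem_cons.1 hx with rfl | hx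
          · exact Or.inl (Or.inr rfl)
          · exact Or.inr ⟨hx, hr⟩
    · have h1 := ih c hc
      refine ⟨by simpa [hz] using h1.1, ?_⟩
      intro x
      simp only [List.foldl_cons, if_neg hz]
      rw [h1.2 x]
      constructor
      · rintro (hx | hx)
        · exact Or.inl hx
        · exact Or.inr ⟨by simp [hx.1], hx.2⟩
      · rintro (hx | ⟨hx, hr⟩)
        · exact Or.inl hx
        · rcases List.mem_cons.1 hx with rfl | hx
          · exact absurd hr hz
          · exact Or.inr ⟨hx, hr⟩

lemma cands_spec (play_time L : Int) :
    ∀ (logs : List (Int × Int)) (c : PySem.Set Int), c.Nodup →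
    (logs.foldl (fun c p => [p.1 - L, p.2 - L, p.1, p.2].foldl
        (fun c x => if 0 ≤ x ∧ x ≤ play_time - L then PySem.Set.add c x else c) c) c).Nodup ∧
    (∀ x, x ∈ logs.foldl (fun c p => [p.1 - L, p.2 - L, p.1, p.2].foldl
        (fun c x => if 0 ≤ x ∧ x ≤ play_time - L then PySem.Set.add c x else c) c) c
      ↔ x ∈ c ∨ ∃ p ∈ logs, (x = p.1 - L ∨ x = p.2 - L ∨ x = p.1 ∨ x = p.2) ∧
          0 ≤ x ∧ x ≤ play_time - L) := by
  intro logs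
  induction logs with
  | nil => intro c hc; exact ⟨hc, by simp⟩
  | cons p t ih =>
    intro c hc
    have h1 := condfold_spec play_time L [p.1 - L, p.2 - L, p.1, p.2] c hc
    have h2 := ih _ h1.1
    refine ⟨h2.1, ?_⟩
    intro x
    rw [List.foldl_cons, h2.2 x, h1.2 x]
    constructor
    · rintro ((hx | hx) | ⟨q, hq, hx⟩)
      · exact Or.inl hx
      · exact Or.inr ⟨p, by simp, by simpa using hx⟩
      · exact Or.inr ⟨q, by simp [hq], hx⟩
    · rintro (hx | ⟨q, hq, hx⟩)
      · exact Or.inl (Or.inl hx)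
      · rcases List.mem_cons.1 hq with rfl | hq
        · exact Or.inl (Or.inr (by simpa using hx))
        · exact Or.inr ⟨q, hq, hx⟩

-- membership of the event start times
lemma mem_evs_fst (L : Int) (p : Int × Int) (x : Int) :
    (x ∈ (evs L p).map Prod.fst) ↔ (x = p.1 - L ∨ x = p.2 - L ∨ x = p.1 ∨ x = p.2) := by
  unfold evs
  split_ifs <;> simp <;> tauto

-- membership of all event start times of A
lemma mem_xs0 (play_time L : Int) (logs : List (Int × Int)) (z : Int) :
    (z ∈ ((logs.flatMap (evs L) ++ [((0 : Int), (0 : Int))] ++ [(play_time - L, (0 : Int))]).map Prod.fst))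
      ↔ (z = 0 ∨ z = play_time - L ∨ ∃ p ∈ logs, z = p.1 - L ∨ z = p.2 - L ∨ z = p.1 ∨ z = p.2) := by
  simp only [List.map_append, List.mem_append, List.map_cons, List.map_nil, List.mem_singleton,
    List.mem_map, List.mem_flatMap]
  constructor
  · rintro ((⟨q, ⟨p, hp, hq⟩, rfl⟩ | rfl) | rfl)
    · refine Or.inr (Or.inr ⟨p, hp, ?_⟩)
      have : q.1 ∈ (evs L p).map Prod.fst := List.mem_map_of_mem hq
      rw [mem_evs_fst] at this
      exact this
    · exact Or.inl rfl
    · exact Or.inr (Or.inl rfl)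
  · rintro (rfl | rfl | ⟨p, hp, hz⟩)
    · simp
    · simp
    · have : z ∈ (evs L p).map Prod.fst := (mem_evs_fst L p z).2 hz
      rcases List.mem_map.1 this with ⟨q, hq, rfl⟩
      exact Or.inl (Or.inl ⟨q, ⟨p, hp, hq⟩, rfl⟩)

-- ===== VERDICT (by name: the statement is the Claim_ definition above) =====
theorem sweeping_spec : Claim_equal_sweeping := by
  intro play_time L logs hdom hpre
  have hL : 0 ≤ L := hpre
  unfold Spec_sweeping
  simp only [Dom_sweeping, pvDomInt, Bool.and_eq_true, decide_eq_true_eq,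
    List.all_eq_true] at hdom
  obtain ⟨⟨hpt, hLb⟩, hlb⟩ := hdom
  -- A's period list as a flatMap
  have hperiods : (logs.foldl (fun acc p =>
      if p.2 - p.1 < L then
        acc ++ [(p.1 - L, (1 : Int)), (p.2 - L, -1), (p.1, -1), (p.2, 1)]
      else
        acc ++ [(p.1 - L, (1 : Int)), (p.1, -1), (p.2 - L, -1), (p.2, 1)]) [])
      = logs.flatMap (evs L) := by
    have hf : (fun (acc : List (Int × Int)) (p : Int × Int) =>
        if p.2 - p.1 < L then
          acc ++ [(p.1 - L, (1 : Int)), (p.2 - L, -1), (p.1, -1), (p.2, 1)]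
        else
          acc ++ [(p.1 - L, (1 : Int)), (p.1, -1), (p.2 - L, -1), (p.2, 1)])
        = fun acc p => acc ++ evs L p := by
      funext acc p; unfold evs; split <;> rfl
    rw [hf, PySem.List.foldl_append_eq_flatMap, List.nil_append]
  have hA : sweeping play_time L logs
      = ((PySem.List.sorted2 (logs.flatMap (evs L) ++ [((0 : Int), (0 : Int))]
            ++ [(play_time - L, (0 : Int))]) Prod.fst Prod.snd false).foldl
          (sweepStep play_time L) (-1, -1, 0, 0, -(10 ^ 18))).2.1 := by
    unfold sweeping
    rw [hperiods]
  set periods0 := logs.flatMap (evs L) ++ [((0 : Int), (0 : Int))]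
      ++ [(play_time - L, (0 : Int))] with hper0
  set sortedP := PySem.List.sorted2 periods0 Prod.fst Prod.snd false with hsortedP
  have hpermP : sortedP.Perm periods0 := PySem.List.sorted2_perm periods0 _ _ false
  -- every event time is far above A's initial before_time
  have hbound : ∀ p ∈ sortedP, -(10 ^ 18) ≤ p.1 := by
    intro p hp
    rw [hpermP.mem_iff, hper0] at hp
    rcases List.mem_append.1 hp with hp | hp
    · rcases List.mem_append.1 hp with hp | hp
      · rcases List.mem_flatMap.1 hp with ⟨q, hq, hpq⟩
        have hq1 := (hlb q hq).1
        have hq2 := (hlb q hq).2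
        unfold evs at hpq
        split at hpq <;> simp at hpq <;>
          rcases hpq with hpq | hpq | hpq | hpq <;>
          (try obtain ⟨h1, h2⟩ := hpq) <;> omega
      · simp at hp; subst hp; norm_num
    · simp at hp; subst hp; simp; omega
  have hloop := loopA_eq play_time L sortedP sortedP [] (-1) (-1) 0 (-(10 ^ 18))
    (by simp) (by rw [hsortedP]; exact sorted2_fst_pairwise periods0) (by simp) hbound rfl
  have hA2 : sweeping play_time L logs
      = ((sortedP.map Prod.fst).foldl (stepR play_time L (gsum sortedP)) (-1, -1)).2 := by
    rw [hA]
    have := congrArg Prod.snd hloop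
    simpa using this
  -- replace the event value function by the direct overlap
  have hgv : ∀ x ∈ sortedP.map Prod.fst, gsum sortedP x = ovSum L logs x := by
    intro x _
    rw [gsum_perm _ _ x hpermP, hper0, gsum_append, gsum_append,
      gsum_flatMap_evs L hL logs x]
    simp [gsum]
  rw [foldl_stepR_congr play_time L (gsum sortedP) (ovSum L logs) _ _ hgv] at hA2
  by_cases hneg : play_time - L < 0
  · rw [foldl_stepR_neg play_time L _ hneg] at hA2
    unfold sweeping_alt
    rw [if_pos hneg, hA2]
  · -- the in-range candidates, deduplicated, are exactly B's sorted set
    rw [foldl_stepR_filter] at hA2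
    rw [← foldl_stepN_dedupAdj (ovSum L logs)
      ((sortedP.map Prod.fst).filter (fun x => decide (0 ≤ x ∧ x ≤ play_time - L)))] at hA2
    have hc0 : (PySem.Set.ofList [(0 : Int), play_time - L]).Nodup :=
      PySem.Set.nodup_ofList _
    obtain ⟨hcnd, hcmem⟩ := cands_spec play_time L logs _ hc0
    have hpw0 : (sortedP.map Prod.fst).Pairwise (· ≤ ·) :=
      List.pairwise_map.2 (by rw [hsortedP]; exact sorted2_fst_pairwise periods0)
    have hpwf := hpw0.filter (fun x => decide (0 ≤ x ∧ x ≤ play_time - L))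
    have hpwd := pairwise_lt_dedupAdj _ hpwf
    have hndd : (dedupAdj ((sortedP.map Prod.fst).filter
        (fun x => decide (0 ≤ x ∧ x ≤ play_time - L)))).Nodup :=
      hpwd.imp (fun h => ne_of_lt h)
    have hmemiff : ∀ z, z ∈ dedupAdj ((sortedP.map Prod.fst).filter
        (fun x => decide (0 ≤ x ∧ x ≤ play_time - L)))
        ↔ z ∈ logs.foldl (fun c p => [p.1 - L, p.2 - L, p.1, p.2].foldl
            (fun c x => if 0 ≤ x ∧ x ≤ play_time - L then PySem.Set.add c x else c) c)
            (PySem.Set.ofList [0, play_time - L]) := by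
      intro z
      rw [mem_dedupAdj, List.mem_filter, hcmem z, decide_eq_true_eq]
      have hz0 : z ∈ sortedP.map Prod.fst ↔ (z = 0 ∨ z = play_time - L
          ∨ ∃ p ∈ logs, z = p.1 - L ∨ z = p.2 - L ∨ z = p.1 ∨ z = p.2) := by
        rw [List.Perm.mem_iff (hpermP.map Prod.fst), hper0]
        exact mem_xs0 play_time L logs z
      rw [hz0, PySem.Set.mem_ofList]
      constructor
      · rintro ⟨(rfl | rfl | ⟨p, hp, hz⟩), hr⟩
        · exact Or.inl (by simp)
        · exact Or.inl (by simp)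
        · exact Or.inr ⟨p, hp, hz, hr⟩
      · rintro (hz | ⟨p, hp, hz, hr⟩)
        · simp at hz
          rcases hz with rfl | rfl
          · exact ⟨Or.inl rfl, by omega⟩
          · exact ⟨Or.inr (Or.inl rfl), by omega⟩
        · exact ⟨Or.inr (Or.inr ⟨p, hp, hz⟩), hr⟩
    have hperm : (dedupAdj ((sortedP.map Prod.fst).filter
        (fun x => decide (0 ≤ x ∧ x ≤ play_time - L)))).Perm
        (logs.foldl (fun c p => [p.1 - L, p.2 - L, p.1, p.2].foldl
          (fun c x => if 0 ≤ x ∧ x ≤ play_time - L then PySem.Set.add c x else c) c)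
          (PySem.Set.ofList [0, play_time - L])) :=
      (List.perm_ext_iff_of_nodup hndd hcnd).2 hmemiff
    have hsortedC := PySem.List.sorted_eq_of_perm_of_pairwise_lt _ _
      (fun (x : Int) => x) hperm hpwd
    have hBdef : sweeping_alt play_time L logs
        = ((PySem.List.sorted (logs.foldl (fun c p => [p.1 - L, p.2 - L, p.1, p.2].foldl
              (fun c x => if 0 ≤ x ∧ x ≤ play_time - L then PySem.Set.add c x else c) c)
              (PySem.Set.ofList [0, play_time - L])) (fun x => x) false).foldl
            (stepN (ovSum L logs)) (-1, -1)).2 := by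
      unfold sweeping_alt
      rw [if_neg hneg]
      rfl
    rw [hBdef, hsortedC, hA2]
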